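-- pv_equiv track=rewrite | github.com/RenanKovachich/Beecrowd-Python-Iniciantes | Recomendados/2434.py | menor_saldo_conta
-- ===== SOURCE A (Python) =====
-- def menor_saldo_conta(n, s, movimentacoes):
--     menor_saldo = s
--     saldo_atual = s
--
--     for movimentacao in movimentacoes:
--         saldo_atual += movimentacao
--         if saldo_atual < menor_saldo:
--             menor_saldo = saldo_atual
--
--     return menor_saldo
-- ===== SOURCE B (Python) =====
-- def menor_saldo_conta(n, s, movimentacoes):
--     # Backward pass: queda is the minimum prefix sum of the movements still ahead
--     # (including the empty prefix, hence never positive). The minimum running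
--     # balance is the initial balance plus that worst drop.
--     queda = 0
--     for m in reversed(movimentacoes):
--         queda = min(0, m + queda)
--     return s + queda
-- ===== Notes on version B (the rewrite author's own statement) =====
-- stated objective: alternative
-- what changed: B replaces the forward scan that tracks the running balance and running minimum with a backward right-fold computing the worst future drop (minimum prefix sum, queda = min(0, m + queda)) and returns s plus that drop; no running balance is ever maintained.
import Mathlib
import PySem

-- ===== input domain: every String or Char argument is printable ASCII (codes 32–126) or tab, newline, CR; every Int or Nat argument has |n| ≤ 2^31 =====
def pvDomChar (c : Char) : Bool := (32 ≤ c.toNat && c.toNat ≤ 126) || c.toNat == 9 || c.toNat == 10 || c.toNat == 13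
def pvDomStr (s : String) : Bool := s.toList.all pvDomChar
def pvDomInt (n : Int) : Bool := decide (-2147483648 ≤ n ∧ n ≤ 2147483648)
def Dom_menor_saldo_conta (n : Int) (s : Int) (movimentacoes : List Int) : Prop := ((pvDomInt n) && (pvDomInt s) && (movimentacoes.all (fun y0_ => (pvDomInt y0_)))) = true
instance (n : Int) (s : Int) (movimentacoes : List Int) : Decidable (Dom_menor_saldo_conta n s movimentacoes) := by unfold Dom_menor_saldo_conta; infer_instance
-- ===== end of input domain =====

-- B computes the minimum running balance via a backward pass over the movements
-- (worst future drop, a right fold), instead of a forward running-balance scan: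
-- alternative decomposition, same cost.


-- ===== PORT A =====
-- literal port of A: single forward fold carrying (menor_saldo, saldo_atual)
def menor_saldo_conta (n : Int) (s : Int) (movimentacoes : List Int) : Int :=
  (movimentacoes.foldl
    (fun (st : Int × Int) (movimentacao : Int) =>
      let saldo_atual := st.2 + movimentacao
      (if saldo_atual < st.1 then saldo_atual else st.1, saldo_atual))
    (s, s)).1

-- ===== PORT B =====
-- port of B: fold over the reversed movements computing the worst future drop, then add s
def menor_saldo_conta_alt (n : Int) (s : Int) (movimentacoes : List Int) : Int :=
  let queda := movimentacoes.reverse.foldl (fun (queda : Int) (m : Int) => min 0 (m + queda)) 0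
  s + queda

-- ===== PRECONDITION & SPEC =====
def Spec_menor_saldo_conta (n : Int) (s : Int) (movimentacoes : List Int) (out : Int) : Prop := out = menor_saldo_conta_alt n s movimentacoes
instance (n : Int) (s : Int) (movimentacoes : List Int) (out : Int) : Decidable (Spec_menor_saldo_conta n s movimentacoes out) := by unfold Spec_menor_saldo_conta; infer_instance

-- ===== CLAIM (what is proved, stated in full; the proofs are below) =====
def Claim_equal_menor_saldo_conta : Prop := ∀ (n : Int) (s : Int) (movimentacoes : List Int), Dom_menor_saldo_conta n s movimentacoes → Spec_menor_saldo_conta n s movimentacoes (menor_saldo_conta n s movimentacoes)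

-- ===== LEMMAS AND PROOFS =====

-- proof-side reference: minimum of all running balances starting from saldo
def pvMinPrefix : Int → List Int → Int
  | saldo, [] => saldo
  | saldo, m :: r => min saldo (pvMinPrefix (saldo + m) r)

-- proof-side reference: worst (most negative) prefix sum of the movements, empty prefix included
def pvDrop : List Int → Int
  | [] => 0
  | m :: r => min 0 (m + pvDrop r)

lemma pvMinPrefix_le (saldo : Int) (l : List Int) : pvMinPrefix saldo l ≤ saldo := by
  cases l with
  | nil => simp [pvMinPrefix]
  | cons m r => simp [pvMinPrefix]

lemma fold_min (movs : List Int) :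
    ∀ (menor saldo : Int), menor ≤ saldo →
      (movs.foldl
        (fun (st : Int × Int) (movimentacao : Int) =>
          let saldo_atual := st.2 + movimentacao
          (if saldo_atual < st.1 then saldo_atual else st.1, saldo_atual))
        (menor, saldo)).1 = min menor (pvMinPrefix saldo movs) := by
  induction movs with
  | nil => intro menor saldo h; simp [pvMinPrefix]; omega
  | cons m rest ih =>
      intro menor saldo h
      simp only [List.foldl, pvMinPrefix]
      have e : (if saldo + m < menor then saldo + m else menor) = min menor (saldo + m) := by
        rw [min_def]; split_ifs <;> omega
      rw [e, ih _ _ (min_le_right menor (saldo + m))]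
      rw [min_assoc, min_eq_right (pvMinPrefix_le (saldo + m) rest), ← min_assoc,
        min_eq_left h]

lemma minPrefix_drop (movs : List Int) :
    ∀ (saldo : Int), pvMinPrefix saldo movs = saldo + pvDrop movs := by
  induction movs with
  | nil => intro saldo; simp [pvMinPrefix, pvDrop]
  | cons m rest ih =>
      intro saldo
      simp only [pvMinPrefix, pvDrop, ih]
      rw [min_def, min_def]; split_ifs <;> omega

lemma foldr_drop (movs : List Int) :
    movs.foldr (fun (m q : Int) => min 0 (m + q)) 0 = pvDrop movs := by
  induction movs with
  | nil => rfl
  | cons m rest ih => simp [List.foldr, pvDrop, ih]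

-- ===== VERDICT (by name: the statement is the Claim_ definition above) =====
theorem menor_saldo_conta_spec : Claim_equal_menor_saldo_conta := by
  intro n s movs _
  unfold Spec_menor_saldo_conta menor_saldo_conta menor_saldo_conta_alt
  rw [fold_min movs s s le_rfl, min_eq_right (pvMinPrefix_le s movs), minPrefix_drop movs s]
  rw [List.foldl_reverse, foldr_drop]
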